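-- pv_equiv track=rewrite | github.com/alextjanse/AdventOfCode2025 | day2.py | check_2
-- ===== SOURCE A (Python) =====
-- def check_2(id: int) -> bool:
--     s = str(id)
--     l = len(s)
--     i = 1
--     while i <= l // 2:
--         if l % i == 0:
--             q = s[:i]
--             if all(s[i * j: i * j + i] == q for j in range(0, l // i)):
--                 return True
--         i += 1
--     return False
-- ===== SOURCE B (Python) =====
-- def check_2(id: int) -> bool:
--     s = str(id)
--     return (s + s).find(s, 1) != len(s)
-- ===== Notes on version B (the rewrite author's own statement) =====
-- stated objective: idiomatic
-- what changed: A enumerates candidate period lengths i dividing len(s) and compares every chunk against the first; B uses the classic doubled-string idiom, a single substring search (s+s).find(s, 1) != len(s), with no explicit loop or divisor bookkeeping.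
import Mathlib
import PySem

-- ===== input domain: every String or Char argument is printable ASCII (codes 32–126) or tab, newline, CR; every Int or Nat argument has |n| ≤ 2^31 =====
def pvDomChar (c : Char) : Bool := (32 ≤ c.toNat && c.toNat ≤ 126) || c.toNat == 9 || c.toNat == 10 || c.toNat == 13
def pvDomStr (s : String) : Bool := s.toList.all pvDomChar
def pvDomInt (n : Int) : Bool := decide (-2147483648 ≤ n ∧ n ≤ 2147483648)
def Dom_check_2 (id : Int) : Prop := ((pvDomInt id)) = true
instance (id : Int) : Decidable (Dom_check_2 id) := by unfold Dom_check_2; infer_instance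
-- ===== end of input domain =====

-- B replaces A's divisor-enumeration loop with a single self-search over the doubled
-- string ((s + s).find(s, 1) != len(s)); objective: idiomatic.

-- ===== PORT A =====
-- all(s[i*j : i*j+i] == q for j in range(0, l//i)) with q = s[:i]
def chunksAll (s : List Char) (i : Nat) : Bool :=
  (PySem.List.pyRange 0 ((s.length / i : Nat) : Int) 1).all
    (fun j => PySem.List.slice s (some ((i : Int) * j)) (some ((i : Int) * j + (i : Int)))
              == PySem.List.slice s none (some ((i : Int))))

-- the while loop: i counts up from 1 while i ≤ l // 2
def check2Go (s : List Char) (i : Nat) : Bool :=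
  if h : i ≤ s.length / 2 then
    if s.length % i = 0 then
      if chunksAll s i then true
      else check2Go s (i + 1)
    else check2Go s (i + 1)
  else false
termination_by s.length / 2 + 1 - i
decreasing_by all_goals omega

def check_2 (id : Int) : Bool :=
  check2Go (PySem.Int.toChars id) 1

-- ===== PORT B =====
def check_2_alt (id : Int) : Bool :=
  let s := PySem.Int.toChars id
  PySem.Chars.findFrom (s ++ s) s 1 != ((s.length : Nat) : Int)

-- ===== PRECONDITION & SPEC =====
def Spec_check_2 (id : Int) (out : Bool) : Prop := out = check_2_alt id
instance (id : Int) (out : Bool) : Decidable (Spec_check_2 id out) := by unfold Spec_check_2; infer_instance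

-- ===== CLAIM (what is proved, stated in full; the proofs are below) =====
def Claim_equal_check_2 : Prop := ∀ (id : Int), Dom_check_2 id → Spec_check_2 id (check_2 id)

-- ===== LEMMAS AND PROOFS =====

-- rotation by p (mod l) fixes s
def rotFix (s : List Char) (p : Nat) : Prop :=
  ∀ i, i < s.length → s.getD ((p + i) % s.length) ' ' = s.getD i ' '

-- s is d-periodic in the strong sense s[i] = s[i % d]
def perQ (s : List Char) (d : Nat) : Prop :=
  ∀ i, i < s.length → s.getD i ' ' = s.getD (i % d) ' '

theorem toChars_ne_nil (n : Int) : PySem.Int.toChars n ≠ [] := by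
  unfold PySem.Int.toChars
  split
  · simp
  · exact List.ne_nil_of_length_pos Nat.length_toDigits_pos

theorem rot_congr (s : List Char) (p q : Nat) (h : p % s.length = q % s.length)
    (hp : rotFix s p) : rotFix s q := by
  intro i hi
  have hpq : (q + i) % s.length = (p + i) % s.length := by
    rw [Nat.add_mod, ← h, ← Nat.add_mod]
  rw [hpq]; exact hp i hi

theorem rot_add (s : List Char) (p q : Nat) (hp : rotFix s p) (hq : rotFix s q) :
    rotFix s (p + q) := by
  intro i hi
  have hl : 0 < s.length := by omega
  have h1 : (p + q + i) % s.length = (p + (q + i) % s.length) % s.length := by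
    rw [Nat.add_assoc, Nat.add_mod p (q + i), Nat.add_mod p ((q + i) % s.length),
      Nat.mod_mod_of_dvd _ dvd_rfl]
  have hj : (q + i) % s.length < s.length := Nat.mod_lt _ hl
  rw [h1, hp _ hj, hq i hi]

theorem rot_mul (s : List Char) (p : Nat) (hp : rotFix s p) (k : Nat) : rotFix s (k * p) := by
  induction k with
  | zero => intro i hi; simp [Nat.mod_eq_of_lt hi]
  | succ k ih =>
    have := rot_add s (k * p) p ih hp
    simpa [Nat.succ_mul] using this

theorem exists_mul_mod_eq_gcd (p l : Nat) (hl : 0 < l) :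
    ∃ k : Nat, (k * p) % l = Nat.gcd p l % l := by
  set A := Nat.gcdA p l with hA
  refine ⟨(A % l).toNat, ?_⟩
  have hlz : (0 : Int) < l := by exact_mod_cast hl
  have hnn : (0 : Int) ≤ A % l := Int.emod_nonneg A (by omega)
  have hk : ((A % l).toNat : Int) = A % l := Int.toNat_of_nonneg hnn
  have hbez : (Nat.gcd p l : Int) = p * A + l * Nat.gcdB p l := Nat.gcd_eq_gcd_ab p l
  have hgoal : (((A % l).toNat * p : Nat) % l : Int) = ((Nat.gcd p l % l : Nat) : Int) := by
    push_cast
    rw [hk]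
    calc (A % l * p) % l = (A * p) % l := by
            rw [Int.mul_emod, Int.emod_emod_of_dvd _ dvd_rfl, ← Int.mul_emod]
      _ = ((p * A + l * Nat.gcdB p l) - l * Nat.gcdB p l) % l := by ring_nf
      _ = (Nat.gcd p l : Int) % l := by rw [← hbez]; rw [Int.sub_mul_emod_self_left]
  exact_mod_cast hgoal

theorem rot_gcd (s : List Char) (p : Nat) (hp : 0 < p) (hpl : p < s.length)
    (h : rotFix s p) : rotFix s (Nat.gcd p s.length) := by
  obtain ⟨k, hk⟩ := exists_mul_mod_eq_gcd p s.length (by omega)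
  exact rot_congr s (k * p) _ hk (rot_mul s p h k)

theorem per_of_rot_gcd (s : List Char) (p : Nat) (hp : 0 < p) (hpl : p < s.length)
    (h : rotFix s p) : perQ s (Nat.gcd p s.length) := by
  have hg := rot_gcd s p hp hpl h
  set g := Nat.gcd p s.length with hgdef
  have hgp : 0 < g := Nat.gcd_pos_of_pos_left _ hp
  intro i hi
  have hjlt : i % g < s.length := by
    have h1 : i % g < g := Nat.mod_lt _ hgp
    have h2 : g ≤ p := Nat.gcd_le_left _ hp
    omega
  have key : ∀ m j, j < s.length → g * m + j < s.length →
      s.getD (g * m + j) ' ' = s.getD j ' ' := by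
    intro m j hj hmj
    have h2 := rot_mul s g hg m j hj
    rwa [Nat.mul_comm m g, Nat.mod_eq_of_lt hmj] at h2
  have hfin := key (i / g) (i % g) hjlt (by rw [Nat.div_add_mod]; exact hi)
  rw [Nat.div_add_mod] at hfin
  exact hfin

theorem rot_of_per (s : List Char) (d : Nat) (_hd : 0 < d) (hdl : d < s.length)
    (hdvd : d ∣ s.length) (h : perQ s d) : rotFix s d := by
  intro i hi
  have hl : 0 < s.length := by omega
  have hmodl : s.length % d = 0 := Nat.mod_eq_zero_of_dvd hdvd
  by_cases hcase : d + i < s.length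
  · rw [Nat.mod_eq_of_lt hcase, h (d + i) hcase, h i hi, Nat.add_mod_left]
  · have h1 : (d + i) % s.length = d + i - s.length := by
      rw [Nat.mod_eq_sub_mod (by omega)]
      exact Nat.mod_eq_of_lt (by omega)
    have h2 : d + i - s.length < s.length := by omega
    rw [h1, h (d + i - s.length) h2, h i hi]
    congr 1
    have h3 : (d + i - s.length + s.length) % d = (d + i - s.length) % d := by
      rw [Nat.add_mod, hmodl, Nat.add_zero, Nat.mod_mod_of_dvd _ dvd_rfl]
    rw [← h3, Nat.sub_add_cancel (by omega), Nat.add_mod_left]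

theorem drop_getD (s : List Char) (p : Nat) (hpl : p ≤ s.length) (i : Nat) (hi : i < s.length) :
    ((s ++ s).drop p).getD i ' ' = s.getD ((p + i) % s.length) ' ' := by
  have h1 : i < ((s ++ s).drop p).length := by simp; omega
  rw [List.getD_eq_getElem _ _ h1, List.getD_eq_getElem _ _ (Nat.mod_lt _ (by omega))]
  rw [List.getElem_drop]
  by_cases hc : p + i < s.length
  · rw [List.getElem_append_left hc]; simp [Nat.mod_eq_of_lt hc]
  · have h2 : (p + i) % s.length = p + i - s.length := by
      rw [Nat.mod_eq_sub_mod (by omega)]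
      exact Nat.mod_eq_of_lt (by omega)
    rw [List.getElem_append_right (by omega)]; simp [h2]

theorem prefix_iff_rot (s : List Char) (p : Nat) (hpl : p ≤ s.length) :
    (s <+: (s ++ s).drop p) ↔ rotFix s p := by
  rcases Nat.eq_zero_or_pos s.length with hl | hl
  · have hs : s = [] := List.eq_nil_of_length_eq_zero hl
    subst hs
    simp [rotFix]
  constructor
  · rintro ⟨t, ht⟩ i hi
    have hx := drop_getD s p hpl i hi
    rw [← ht, List.getD_append _ _ _ _ hi] at hx
    exact hx.symm
  · intro hrot
    rw [List.prefix_iff_eq_take]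
    apply List.ext_getElem
    · simp; omega
    · intro i hi1 hi2
      have hkey := drop_getD s p hpl i hi1
      have hrw := hrot i hi1
      have e1 : (List.take s.length ((s ++ s).drop p))[i]'hi2 = ((s ++ s).drop p).getD i ' ' := by
        rw [List.getElem_take, List.getD_eq_getElem _ _ (by simp; omega)]
      rw [e1, hkey, hrw, List.getD_eq_getElem _ _ hi1]

theorem chunksAll_eq (s : List Char) (d : Nat) :
    chunksAll s d = true ↔ ∀ j < s.length / d, (s.drop (d * j)).take d = s.take d := by
  unfold chunksAll
  rw [List.all_eq_true]
  have point : ∀ k : Nat,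
      ((PySem.List.slice s (some ((d : Int) * (k : Nat))) (some ((d : Int) * (k : Nat) + (d : Int)))
        == PySem.List.slice s none (some ((d : Int)))) = true)
      ↔ (s.drop (d * k)).take d = s.take d := by
    intro k
    rw [beq_iff_eq,
      show ((d : Int) * (k : Nat)) = (((d * k : Nat) : Int)) by push_cast; ring,
      PySem.List.slice_natCast_add, PySem.List.slice_to_natCast]
  rw [PySem.List.pyRange_zero_natCast]
  constructor
  · intro h j hj
    exact (point j).mp (h ((j : Int)) (List.mem_map.mpr ⟨j, List.mem_range.mpr hj, rfl⟩))
  · intro h x hx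
    obtain ⟨j, hj, rfl⟩ := List.mem_map.mp hx
    exact (point j).mpr (h j (List.mem_range.mp hj))

theorem take_drop_getD (s : List Char) (a n k : Nat) (hk : k < n) (h : a + k < s.length) :
    ((s.drop a).take n).getD k ' ' = s.getD (a + k) ' ' := by
  rw [List.getD_eq_getElem _ _ (by simp; omega), List.getD_eq_getElem _ _ h]
  rw [List.getElem_take, List.getElem_drop]

theorem take_getD (s : List Char) (n k : Nat) (hk : k < n) (h : k < s.length) :
    (s.take n).getD k ' ' = s.getD k ' ' := by
  rw [List.getD_eq_getElem _ _ (by simp; omega), List.getD_eq_getElem _ _ h]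
  rw [List.getElem_take]

theorem chunks_iff_per (s : List Char) (d : Nat) (hd : 0 < d) (hl : 0 < s.length)
    (hdvd : d ∣ s.length) : chunksAll s d = true ↔ perQ s d := by
  obtain ⟨m, hm⟩ := hdvd
  have hdle : d ≤ s.length := by
    rcases Nat.eq_zero_or_pos m with h0 | h0
    · rw [h0, Nat.mul_zero] at hm; omega
    · calc d = d * 1 := by ring
        _ ≤ d * m := Nat.mul_le_mul_left d h0
        _ = s.length := hm.symm
  have hbound : ∀ j, j < s.length / d → d * j + d ≤ s.length := by
    intro j hj
    have h1 : j < m := by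
      rw [hm, Nat.mul_div_cancel_left _ hd] at hj; exact hj
    calc d * j + d = d * (j + 1) := by ring
      _ ≤ d * m := Nat.mul_le_mul_left d h1
      _ = s.length := hm.symm
  rw [chunksAll_eq]
  constructor
  · intro h i hi
    have hq : i / d < s.length / d := Nat.div_lt_div_of_lt_of_dvd ⟨m, hm⟩ hi
    have hle := hbound _ hq
    have hjd : i % d < d := Nat.mod_lt _ hd
    have hch := congrArg (fun t => t.getD (i % d) ' ') (h (i / d) hq)
    simp only at hch
    rw [take_drop_getD s _ _ _ hjd (by omega), take_getD s _ _ hjd (by omega)] at hch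
    rw [Nat.div_add_mod] at hch
    exact hch
  · intro h j hj
    have hle := hbound j hj
    apply List.ext_getElem
    · simp; omega
    · intro k hk1 hk2
      have hkd : k < d := by simp at hk1; omega
      have e1 : ((s.drop (d * j)).take d)[k]'hk1 = s.getD (d * j + k) ' ' := by
        rw [← take_drop_getD s (d * j) d k hkd (by omega)]
        rw [List.getD_eq_getElem _ _ hk1]
      have e2 : (s.take d)[k]'hk2 = s.getD k ' ' := by
        rw [← take_getD s d k hkd (by omega), List.getD_eq_getElem _ _ hk2]
      rw [e1, e2]
      have p1 := h (d * j + k) (by omega)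
      have p2 : (d * j + k) % d = k := by
        rw [Nat.mul_add_mod, Nat.mod_eq_of_lt hkd]
      rw [p2] at p1
      exact p1

theorem go_true_iff (s : List Char) (i : Nat) :
    check2Go s i = true ↔
      ∃ d, i ≤ d ∧ d ≤ s.length / 2 ∧ s.length % d = 0 ∧ chunksAll s d = true := by
  fun_induction check2Go s i with
  | case1 i h hmod hall => exact ⟨fun _ => ⟨i, le_refl i, h, hmod, hall⟩, fun _ => rfl⟩
  | case2 i h hmod hall ih =>
    rw [ih]
    constructor
    · rintro ⟨d, hd1, hd2, hd3, hd4⟩; exact ⟨d, by omega, hd2, hd3, hd4⟩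
    · rintro ⟨d, hd1, hd2, hd3, hd4⟩
      refine ⟨d, ?_, hd2, hd3, hd4⟩
      rcases Nat.eq_or_lt_of_le hd1 with rfl | hlt
      · rw [hd4] at hall; exact absurd rfl hall
      · omega
  | case3 i h hmod ih =>
    rw [ih]
    constructor
    · rintro ⟨d, hd1, hd2, hd3, hd4⟩; exact ⟨d, by omega, hd2, hd3, hd4⟩
    · rintro ⟨d, hd1, hd2, hd3, hd4⟩
      refine ⟨d, ?_, hd2, hd3, hd4⟩
      rcases Nat.eq_or_lt_of_le hd1 with rfl | hlt
      · exact absurd hd3 hmod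
      · omega
  | case4 i h =>
    refine ⟨fun hh => Bool.noConfusion hh, ?_⟩
    rintro ⟨d, hd1, hd2, _, _⟩
    exact absurd hd2 (by omega)

theorem alt_true_iff (s : List Char) (hs : s ≠ []) :
    (PySem.Chars.findFrom (s ++ s) s 1 != ((s.length : Nat) : Int)) = true ↔
      ∃ p, 1 ≤ p ∧ p < s.length ∧ s <+: (s ++ s).drop p := by
  have hl : 0 < s.length := List.length_pos_of_ne_nil hs
  have hk : (1 : ℕ) ≤ (s ++ s).length := by simp; omega
  have hcast : ((1 : ℕ) : ℤ) = (1 : ℤ) := Nat.cast_one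
  have hinfix : s <:+: List.drop 1 (s ++ s) := by
    obtain ⟨c, t, rfl⟩ : ∃ c t, s = c :: t := by
      cases s with
      | nil => exact absurd rfl hs
      | cons c t => exact ⟨c, t, rfl⟩
    have hdrop : List.drop 1 (c :: t ++ c :: t) = t ++ c :: t := rfl
    rw [hdrop]
    exact (List.suffix_append _ _).isInfix
  have hne : PySem.Chars.findFrom (s ++ s) s ((1 : ℕ) : ℤ) ≠ -1 := by
    rw [ne_eq, PySem.Chars.findFrom_natCast_eq_neg_one_iff _ _ 1 hk]
    simpa using hinfix
  rw [hcast] at hne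
  have hspec := PySem.Chars.findFrom_natCast_spec (s ++ s) s 1 hk (by rw [hcast]; exact hne)
  rw [hcast] at hspec
  obtain ⟨hge, hpre, hmin⟩ := hspec
  set r := PySem.Chars.findFrom (s ++ s) s 1 with hr
  have hrle : r.toNat ≤ s.length := by
    by_contra hgt
    rw [Nat.not_le] at hgt
    exact hmin s.length (by omega) hgt (by rw [List.drop_left])
  constructor
  · intro hb
    have hne2 : r ≠ ((s.length : Nat) : Int) := by simpa using hb
    exact ⟨r.toNat, by omega, by omega, hpre⟩
  · rintro ⟨p, hp1, hp2, hpp⟩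
    simp only [bne_iff_ne, ne_eq]
    intro heq
    exact hmin p hp1 (by omega) hpp

theorem main_iff (s : List Char) (hs : s ≠ []) :
    check2Go s 1 = true ↔
      (PySem.Chars.findFrom (s ++ s) s 1 != ((s.length : Nat) : Int)) = true := by
  have hl : 0 < s.length := List.length_pos_of_ne_nil hs
  rw [go_true_iff, alt_true_iff s hs]
  constructor
  · rintro ⟨d, hd1, hd2, hd3, hd4⟩
    have hdvd : d ∣ s.length := Nat.dvd_of_mod_eq_zero hd3
    have hdl : d < s.length := by omega
    have hper := (chunks_iff_per s d (by omega) hl hdvd).mp hd4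
    have hrot := rot_of_per s d (by omega) hdl hdvd hper
    exact ⟨d, hd1, hdl, (prefix_iff_rot s d (by omega)).mpr hrot⟩
  · rintro ⟨p, hp1, hp2, hpp⟩
    have hrot := (prefix_iff_rot s p (by omega)).mp hpp
    have hper := per_of_rot_gcd s p (by omega) hp2 hrot
    set g := Nat.gcd p s.length with hg
    have hgpos : 0 < g := Nat.gcd_pos_of_pos_left _ (by omega)
    have hgle : g ≤ p := Nat.gcd_le_left _ (by omega)
    obtain ⟨m, hm⟩ : g ∣ s.length := Nat.gcd_dvd_right _ _
    have hm2 : 2 ≤ m := by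
      rcases (by omega : m = 0 ∨ m = 1 ∨ 2 ≤ m) with h0 | h0 | h0
      · rw [h0, Nat.mul_zero] at hm; omega
      · rw [h0, Nat.mul_one] at hm; omega
      · exact h0
    have hghalf : g ≤ s.length / 2 := by
      have h2 : g * 2 ≤ g * m := Nat.mul_le_mul_left g hm2
      rw [← hm] at h2
      omega
    refine ⟨g, hgpos, hghalf, Nat.mod_eq_zero_of_dvd ⟨m, hm⟩, ?_⟩
    exact (chunks_iff_per s g hgpos hl ⟨m, hm⟩).mpr hper

-- ===== VERDICT (by name: the statement is the Claim_ definition above) =====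
theorem check_2_spec : Claim_equal_check_2 := by
  intro id _
  unfold Spec_check_2 check_2 check_2_alt
  exact Bool.coe_iff_coe.mp (main_iff (PySem.Int.toChars id) (toChars_ne_nil id))
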